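-- pv_equiv track=rewrite | github.com/bloopy-code/advent_code | aoc_25/solutions/day06.py | calculate_homework
-- ===== SOURCE A (Python) =====
-- from math import prod
--
-- GridSplits = list[list[str]]  # output of format as splits
--
-- HomeworkInts = list[list[int | str]]  # [[1, 2, '+']]
--
-- def format_homework_as_splits(puzzle_input: str) -> GridSplits:
--     """Format homework by splitting on spaces.
--
--     Args:
--         puzzle_input (str): Input puzzle grid.
--
--     Returns:
--         GridSplits: [['40', '30', '1'], ['10', '20', '3']]
--     """
--     return [line.split() for line in puzzle_input.splitlines()]
--
-- def rearrange_homework_ints(data: GridSplits) -> HomeworkInts: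
--     """Rearrange homework and convert to ints.
--
--     Args:
--         data (GridSplits): e.g.  [['40', '30', '1'], ['10', '20', '3']]
--
--     Returns:
--         HomeworkInts:  [[40, 10], [30, 20],[1, 3]]
--     """
--     new: HomeworkInts = []
--     for i in range(len(data[0])):
--         n: list[int | str] = []
--         for row in data:
--             try:
--                 n.append(int(row[i]))
--             except ValueError:
--                 n.append(row[i])
--         new.append(n)
--     return new
--
-- def add_or_sum(numbers: list[int], operator: str) -> int:
--     """Add or sum the numbers provided, depending on operator.
--
--     Args:
--         numbers (list[int]): [1, 2, 3]
--         operator (str): * or +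
--
--     Returns:
--         int: result of operation on list.
--     """
--     if operator == '+':
--         return sum(numbers)
--     elif operator == '*':
--         return prod(numbers)
--     else:
--         raise ValueError('What operator is that?!')
--
-- def calculate_homework(data: str) -> int:
--     """PART 1:
--     Data comes in as string.
--     Gets split into lines and then each line split by space.
--     Each string number gets converted to int, and operator should
--     be final element in list.
--
--     Then for each row [int, int, int, operator], get the value of
--     them sum or prod, add to total.
--
--     Args:
--         data (str): puzzle input data.
--
--     Returns:
--         int: answer for part 1
--     """
--     homework: GridSplits = format_homework_as_splits(data)
--     int_homework: HomeworkInts = rearrange_homework_ints(homework)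
--     total: int = 0
--
--     for row in int_homework:
--         nums: list[int] = [v for v in row[:-1] if isinstance(v, int)]
--         sign = row[-1]
--         assert isinstance(sign, str)
--
--         total += add_or_sum(nums, sign)
--     return total
-- ===== SOURCE B (Python) =====
-- def calculate_homework(data: str) -> int:
--     """Per-column aggregation: no transposed table, running accumulator per column."""
--     rows = [line.split() for line in data.splitlines()]
--     total = 0
--     for i in range(len(rows[0])):
--         op = rows[-1][i]
--         if op == '+':
--             acc = 0
--             for row in rows[:-1]:
--                 try:
--                     acc += int(row[i])
--                 except ValueError:
--                     pass
--         elif op == '*':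
--             acc = 1
--             for row in rows[:-1]:
--                 try:
--                     acc *= int(row[i])
--                 except ValueError:
--                     pass
--         else:
--             raise ValueError('What operator is that?!')
--         total += acc
--     return total
-- ===== Notes on version B (the rewrite author's own statement) =====
-- stated objective: simpler
-- what changed: B drops the intermediate transposed int|str table: it walks column indices of the split grid directly, reads the operator from the last row first and folds the parseable cells of the other rows into a running sum/product accumulator, so no HomeworkInts structure, no filtering pass and no isinstance dispatch remain.
import Mathlib
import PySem

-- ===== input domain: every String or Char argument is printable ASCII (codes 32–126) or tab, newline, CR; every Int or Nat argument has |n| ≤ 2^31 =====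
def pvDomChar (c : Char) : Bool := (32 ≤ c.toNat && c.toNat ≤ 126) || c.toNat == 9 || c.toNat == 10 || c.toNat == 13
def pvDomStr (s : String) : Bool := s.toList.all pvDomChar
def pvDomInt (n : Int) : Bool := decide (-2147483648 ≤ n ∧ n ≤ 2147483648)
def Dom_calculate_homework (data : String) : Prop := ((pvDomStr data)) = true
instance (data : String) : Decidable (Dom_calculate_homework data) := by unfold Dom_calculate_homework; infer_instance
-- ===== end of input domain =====

-- B removes A's transposed int|str table and aggregates each column directly; equivalence on Pre_ (inputs where A returns).

-- ===== PORT A =====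
-- format_homework_as_splits
def pvFormat (s : String) : List (List String) :=
  (PySem.Str.splitlines s).map PySem.Str.split₀

-- int(row[i]) / except ValueError: keep the string  (row[i]: in range on Pre_; default "" otherwise)
def pvCell (cell : String) : Sum Int String :=
  match PySem.Int.ofStr? cell with
  | some n => Sum.inl n
  | none => Sum.inr cell

-- rearrange_homework_ints
def pvRearrange (d : List (List String)) : List (List (Sum Int String)) :=
  (List.range (d.headD []).length).map (fun i => d.map (fun row => pvCell (row.getD i "")))

-- add_or_sum (the 'raise ValueError' branch is outside Pre_; value there irrelevant)
def pvAddOrSum (numbers : List Int) (operator : String) : Int :=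
  if operator = "+" then numbers.sum
  else if operator = "*" then numbers.prod
  else 0

def calculate_homework (data : String) : Int :=
  let int_homework := pvRearrange (pvFormat data)
  int_homework.foldl (fun total row =>
    let nums := row.dropLast.filterMap (fun v => match v with | Sum.inl n => some n | Sum.inr _ => none)
    match row.getLast? with        -- sign = row[-1]; assert isinstance(sign, str) fails on inl (outside Pre_)
    | some (Sum.inr s) => total + pvAddOrSum nums s
    | _ => total) 0

-- ===== PORT B =====
def calculate_homework_alt (data : String) : Int :=
  let rows := (PySem.Str.splitlines data).map PySem.Str.split₀
  let lastRow := rows.getLastD []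
  let body := rows.dropLast
  (List.range (rows.headD []).length).foldl (fun total i =>
    let op := lastRow.getD i ""
    if op = "+" then
      total + body.foldl (fun acc r =>
        match PySem.Int.ofStr? (r.getD i "") with | some n => acc + n | none => acc) 0
    else if op = "*" then
      total + body.foldl (fun acc r =>
        match PySem.Int.ofStr? (r.getD i "") with | some n => acc * n | none => acc) 1
    else total) 0    -- raise ValueError: outside Pre_

-- ===== PRECONDITION & SPEC =====
-- Pre_ excludes exactly the inputs where the Python A raises: an input with no line (IndexError on data[0]),
-- a row shorter than the first row (IndexError), a last-row cell that parses as int (AssertionError),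
-- or a last-row cell other than '+'/'*' (ValueError).
def Pre_calculate_homework (data : String) : Prop :=
  let rows := (PySem.Str.splitlines data).map PySem.Str.split₀
  rows ≠ [] ∧
  (∀ r ∈ rows, (rows.headD []).length ≤ r.length) ∧
  (∀ i < (rows.headD []).length,
     PySem.Int.ofStr? ((rows.getLastD []).getD i "") = none ∧
     ((rows.getLastD []).getD i "" = "+" ∨ (rows.getLastD []).getD i "" = "*"))
instance (data : String) : Decidable (Pre_calculate_homework data) := by
  unfold Pre_calculate_homework; infer_instance

def pvWitness_calculate_homework : String := "1 2\n3 4\n+ *"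

def Spec_calculate_homework (data : String) (out : Int) : Prop := out = calculate_homework_alt data
instance (data : String) (out : Int) : Decidable (Spec_calculate_homework data out) := by unfold Spec_calculate_homework; infer_instance

-- ===== CLAIM (what is proved, stated in full; the proofs are below) =====
def Claim_equal_calculate_homework : Prop := ∀ (data : String), Dom_calculate_homework data → Pre_calculate_homework data → Spec_calculate_homework data (calculate_homework data)

-- ===== LEMMAS AND PROOFS =====

-- folding '+ parsed cell' equals adding the sum of the parsed cells
theorem pv_fold_sum {α : Type} (g : α → Option Int) (l : List α) (acc : Int) :
    l.foldl (fun a r => match g r with | some n => a + n | none => a) acc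
      = acc + (l.filterMap g).sum := by
  induction l generalizing acc with
  | nil => simp
  | cons x xs ih =>
    simp only [List.foldl_cons, List.filterMap_cons]
    cases g x <;> simp [ih, add_assoc]

-- folding '* parsed cell' equals multiplying by the product of the parsed cells
theorem pv_fold_prod {α : Type} (g : α → Option Int) (l : List α) (acc : Int) :
    l.foldl (fun a r => match g r with | some n => a * n | none => a) acc
      = acc * (l.filterMap g).prod := by
  induction l generalizing acc with
  | nil => simp
  | cons x xs ih =>
    simp only [List.foldl_cons, List.filterMap_cons]
    cases g x <;> simp [ih, mul_assoc]

-- the filterMap over A's pvCell column extracts exactly the parseable cells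
theorem pv_nums_eq (d : List (List String)) (i : Nat) :
    (d.map (fun row => pvCell (row.getD i ""))).filterMap
        (fun v => match v with | Sum.inl n => some n | Sum.inr _ => none)
      = d.filterMap (fun row => PySem.Int.ofStr? (row.getD i "")) := by
  induction d with
  | nil => rfl
  | cons r rs ih =>
    simp only [List.map_cons, List.filterMap_cons, pvCell, List.getD] at ih ⊢
    cases PySem.Int.ofStr? (r[i]?.getD "") <;> simp [ih]

-- ===== VERDICT (by name: the statement is the Claim_ definition above) =====
theorem calculate_homework_spec : Claim_equal_calculate_homework := by
  intro data _ hpre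
  unfold Spec_calculate_homework calculate_homework calculate_homework_alt pvRearrange pvFormat
  obtain ⟨hne, _hlen, hlast⟩ := hpre
  set rows := (PySem.Str.splitlines data).map PySem.Str.split₀ with hrows
  obtain ⟨lastRow, hlr⟩ : ∃ x, rows.getLast? = some x :=
    Option.isSome_iff_exists.mp (by simpa [List.getLast?_isSome] using hne)
  have hlrD : rows.getLastD [] = lastRow := by
    rw [List.getLastD_eq_getLast?, hlr]; rfl
  rw [List.foldl_map]
  apply PySem.List.foldl_congr_mem
  intro total i hi
  have hiw : i < (rows.headD []).length := List.mem_range.mp hi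
  obtain ⟨hparse, hop⟩ := hlast i hiw
  rw [hlrD] at hparse hop
  simp only [List.getD] at hparse hop
  -- A's column: last element and middle cells
  have hcolLast : ((rows.map (fun row => pvCell (row.getD i ""))).getLast?)
      = some (pvCell (lastRow.getD i "")) := by
    rw [List.getLast?_map, hlr]; rfl
  have hcell : pvCell (lastRow.getD i "") = Sum.inr (lastRow.getD i "") := by
    simp [pvCell, List.getD, hparse]
  have hnums : ((rows.map (fun row => pvCell (row.getD i ""))).dropLast.filterMap
        (fun v => match v with | Sum.inl n => some n | Sum.inr _ => none))
      = rows.dropLast.filterMap (fun row => PySem.Int.ofStr? (row.getD i "")) := by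
    rw [← List.map_dropLast, pv_nums_eq]
  simp only [hcolLast, hcell, hnums, hlrD]
  rcases hop with h | h <;>
    simp [List.getD, h, pvAddOrSum, pv_fold_sum, pv_fold_prod]
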